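-- pv_equiv track=rewrite | github.com/ad-astra-per-ardua/Solving-Algorithm | acmicpc/#23304 아카라카/아카라카.py | is_akaraka
-- ===== SOURCE A (Python) =====
-- def is_akaraka(s):
--     if len(s) <= 1:
--         return True
--     n = len(s) // 2
--     if s != s[::-1]:
--         return False
--     if is_akaraka(s[:n]) and is_akaraka(s[-n:]):
--         return True
--     return False
-- ===== SOURCE B (Python) =====
-- def is_akaraka(s):
--     # Iterative: a palindrome's two halves are mirror images, so checking one
--     # chain of halves suffices (geometric sum of palindrome checks).
--     while len(s) > 1:
--         if s != s[::-1]: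
--             return False
--         s = s[:len(s) // 2]
--     return True
-- ===== Notes on version B (the rewrite author's own statement) =====
-- stated objective: faster
-- what changed: A recurses on both halves of each palindrome level; B iterates down a single chain of halves (the second half is the first half mirrored, so checking it is redundant), turning O(n log n) total palindrome-check work into a geometric sum O(n).
import Mathlib
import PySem

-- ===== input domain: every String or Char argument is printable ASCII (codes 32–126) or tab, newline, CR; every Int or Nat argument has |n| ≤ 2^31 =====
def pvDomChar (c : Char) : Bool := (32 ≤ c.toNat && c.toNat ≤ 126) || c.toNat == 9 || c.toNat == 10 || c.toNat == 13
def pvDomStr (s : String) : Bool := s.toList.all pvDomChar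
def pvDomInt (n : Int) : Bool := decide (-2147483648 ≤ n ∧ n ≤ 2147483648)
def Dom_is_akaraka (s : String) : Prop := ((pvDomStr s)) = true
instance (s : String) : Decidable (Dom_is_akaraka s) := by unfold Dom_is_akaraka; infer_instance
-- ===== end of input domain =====

-- B replaces A's double recursion (both halves of each palindrome) by an iterative single
-- chain of halves, since a palindrome's halves are mirror images.

-- termination helpers for the ports (cited by name in decreasing_by)
lemma pvSliceHead_lt (l : List Char) (h : ¬ PySem.List.len l ≤ 1) :
    (PySem.List.slice l none (some (PySem.Int.floordiv (PySem.List.len l) 2))).length < l.length := by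
  simp only [PySem.List.len_eq] at h
  rw [PySem.Int.floordiv_eq_ediv_of_pos (by omega), PySem.List.len_eq,
    PySem.List.slice_to l (by positivity)]
  simp; omega

lemma pvSliceTail_lt (l : List Char) (h : ¬ PySem.List.len l ≤ 1) :
    (PySem.List.slice l (some (-(PySem.Int.floordiv (PySem.List.len l) 2))) none).length < l.length := by
  simp only [PySem.List.len_eq] at h
  rw [PySem.Int.floordiv_eq_ediv_of_pos (by omega), PySem.List.len_eq,
    PySem.List.slice_some_none]
  simp only [List.length_drop]
  unfold PySem.List.clampIdx
  split_ifs <;> omega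

-- ===== PORT A =====
-- A on the code-point list: if len(s) ≤ 1 → True; n = len(s) // 2; if s != s[::-1] → False;
-- then True iff both s[:n] and s[-n:] are akaraka.
def akA (l : List Char) : Bool :=
  if PySem.List.len l ≤ 1 then true
  else
    let n : Int := PySem.Int.floordiv (PySem.List.len l) 2
    if some l ≠ PySem.List.slice? l none none (-1) then false
    else if akA (PySem.List.slice l none (some n)) &&
            akA (PySem.List.slice l (some (-n)) none) then true
    else false
termination_by l.length
decreasing_by
  · exact pvSliceHead_lt l (by assumption)
  · exact pvSliceTail_lt l (by assumption)

def is_akaraka (s : String) : Bool := akA s.toList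

-- ===== PORT B =====
-- B's while loop as tail recursion on the same list: while len(s) > 1, fail if s != s[::-1],
-- else continue with s[:len(s)//2].
def akB (l : List Char) : Bool :=
  if PySem.List.len l > 1 then
    if some l ≠ PySem.List.slice? l none none (-1) then false
    else akB (PySem.List.slice l none (some (PySem.Int.floordiv (PySem.List.len l) 2)))
  else true
termination_by l.length
decreasing_by
  exact pvSliceHead_lt l (by omega)

def is_akaraka_alt (s : String) : Bool := akB s.toList

-- ===== PRECONDITION & SPEC =====
def Spec_is_akaraka (s : String) (out : Bool) : Prop := out = is_akaraka_alt s
instance (s : String) (out : Bool) : Decidable (Spec_is_akaraka s out) := by unfold Spec_is_akaraka; infer_instance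

-- ===== CLAIM (what is proved, stated in full; the proofs are below) =====
def Claim_equal_is_akaraka : Prop := ∀ (s : String), Dom_is_akaraka s → Spec_is_akaraka s (is_akaraka s)

-- ===== LEMMAS AND PROOFS =====

-- akA is invariant under reversal: the palindrome test is symmetric, and on a
-- palindrome the argument equals its own reverse.
lemma akA_reverse (t : List Char) : akA t.reverse = akA t := by
  by_cases hp : t.reverse = t
  · rw [hp]
  · have h1 : 1 < t.length := by
      rcases t with _ | ⟨a, _ | ⟨b, u⟩⟩ <;> simp_all
    rw [akA, akA]
    simp only [PySem.List.len_eq, PySem.List.slice?_none_none_neg_one, List.length_reverse,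
      List.reverse_reverse]
    have h2 : ¬ ((t.length : Int) ≤ 1) := by omega
    rw [if_neg h2, if_neg h2]
    rw [if_pos (by simpa using hp), if_pos (by simpa using fun h => hp h.symm)]

-- the two slices of A, in take/drop form
lemma slice_head_eq (l : List Char) (h : 1 < l.length) :
    PySem.List.slice l none (some (PySem.Int.floordiv ((l.length : Int)) 2)) =
      l.take (l.length / 2) := by
  rw [PySem.Int.floordiv_eq_ediv_of_pos (by omega),
    PySem.List.slice_to l (by positivity)]
  congr 1

lemma slice_tail_eq (l : List Char) (h : 1 < l.length) :
    PySem.List.slice l (some (-(PySem.Int.floordiv ((l.length : Int)) 2))) none =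
      l.drop (l.length - l.length / 2) := by
  rw [PySem.Int.floordiv_eq_ediv_of_pos (by omega),
    PySem.List.slice_some_none]
  congr 1
  unfold PySem.List.clampIdx
  split_ifs <;> omega

-- on a palindrome the tail half is the reverse of the head half
lemma tail_eq_reverse_head (l : List Char) (hpal : l = l.reverse) :
    l.drop (l.length - l.length / 2) = (l.take (l.length / 2)).reverse := by
  conv_lhs => rw [hpal]
  simp only [List.length_reverse]
  rw [List.drop_reverse]
  congr 2
  omega

lemma akA_eq_akB (l : List Char) : akA l = akB l := by
  generalize hn : l.length = n
  induction n using Nat.strong_induction_on generalizing l with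
  | _ n ih =>
    subst hn
    rw [akA, akB]
    simp only [PySem.List.len_eq]
    by_cases h1 : (l.length : Int) ≤ 1
    · rw [if_pos h1, if_neg (show ¬ ((l.length : Int) > 1) by omega)]
    · have hgt : (l.length : Int) > 1 := by omega
      rw [if_neg h1, if_pos hgt]
      have h1' : 1 < l.length := by omega
      by_cases hp : some l ≠ PySem.List.slice? l none none (-1)
      · rw [if_pos hp, if_pos hp]
      · rw [if_neg hp, if_neg hp]
        have hpal : l = l.reverse := by
          have := not_not.mp hp
          rw [PySem.List.slice?_none_none_neg_one] at this
          exact Option.some_injective _ this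
        simp only [slice_head_eq l h1', slice_tail_eq l h1', tail_eq_reverse_head l hpal,
          akA_reverse, Bool.and_self]
        have hlt : (l.take (l.length / 2)).length < l.length := by simp; omega
        rw [ih _ hlt _ rfl]
        cases akB (l.take (l.length / 2)) <;> simp

-- ===== VERDICT (by name: the statement is the Claim_ definition above) =====
theorem is_akaraka_spec : Claim_equal_is_akaraka := by
  intro s _
  unfold Spec_is_akaraka is_akaraka is_akaraka_alt
  exact akA_eq_akB s.toList
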